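-- pv_equiv track=rewrite | github.com/alexwu2021/practice | Python/python3/leetcode/Medium/dp/CountText.py | countTexts
-- ===== SOURCE A (Python) =====
-- def countTexts(S: str) -> int:
--
--     mod = 10 ** 9 + 7
--
--     dp = [0] * (len(S) + 1)
--     dp[0] = 1
--     for i in range(1, len(S) + 1):
--         prev, prev2, prev3, prev4 = i - 1, i - 2, i - 3, i - 4
--
--         dp[i] = dp[prev]
--         if prev2 >= 0 and S[prev] == S[prev2]:
--             dp[i] += dp[prev2]
--         if prev3 >= 0 and S[prev] == S[prev2] and S[prev] == S[prev3]:
--             dp[i] += dp[prev3]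
--
--         if S[prev] in {'7', '9'}:
--             if prev4 >= 0 and S[prev] == S[prev2] and S[prev] == S[prev3] and S[prev] == S[prev4]:
--                 dp[i] += dp[prev4]
--         dp[i] %= mod
--
--     return dp[-1] % mod
-- ===== SOURCE B (Python) =====
-- def _runFactor(c, L):
--     # number of ways to split a run of L equal digits into keypress groups
--     mod = 10 ** 9 + 7
--     cap = 4 if c in '79' else 3
--     f = [1]
--     for n in range(1, L + 1):
--         f.append(sum(f[-cap:]) % mod)
--     return f[L]
--
-- def countTexts(S: str) -> int:
--     mod = 10 ** 9 + 7
--     if not S: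
--         return 1
--     ans, c, L = 1, S[0], 1
--     for ch in S[1:]:
--         if ch == c:
--             L += 1
--         else:
--             ans = ans * _runFactor(c, L) % mod
--             c, L = ch, 1
--     return ans * _runFactor(c, L) % mod
-- ===== Notes on version B (the rewrite author's own statement) =====
-- stated objective: alternative
-- what changed: A's single DP over all positions with four guarded look-backs at equal characters is replaced by a run decomposition: the string is scanned into maximal runs of equal digits, each run's factor comes from a tiny partition recurrence (group size <= 3, or <= 4 for '7'/'9'), and the factors are multiplied mod 1e9+7.
import Mathlib
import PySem

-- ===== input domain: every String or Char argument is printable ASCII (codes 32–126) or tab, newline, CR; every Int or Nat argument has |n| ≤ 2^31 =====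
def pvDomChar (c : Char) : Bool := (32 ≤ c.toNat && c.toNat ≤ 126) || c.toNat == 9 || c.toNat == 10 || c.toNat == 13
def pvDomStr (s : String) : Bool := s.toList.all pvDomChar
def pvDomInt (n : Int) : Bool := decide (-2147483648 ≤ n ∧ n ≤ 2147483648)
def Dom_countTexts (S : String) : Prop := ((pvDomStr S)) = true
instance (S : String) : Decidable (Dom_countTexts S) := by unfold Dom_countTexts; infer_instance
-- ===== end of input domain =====

-- B replaces A's whole-string DP with four guarded look-backs by a run decomposition: a small
-- per-run-length partition recurrence gives each maximal run's factor and the factors are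
-- multiplied mod 1e9+7 (objective: alternative; same asymptotic cost).

-- ===== PORT A =====
def pmod : Int := 1000000007   -- 10 ** 9 + 7

-- one iteration of A's loop (dp kept most-recent-first; dp[i-1-t] = d.getD t 0)
def aStep (cs : List Char) (d : List Int) (i : Nat) : List Int :=
  let sp := cs.getD (i - 1) ' '   -- S[prev]; prev = i-1 is always in range
  let v2 := if 2 ≤ i ∧ sp = cs.getD (i - 2) ' ' then d.getD 1 0 else 0
  let v3 := if 3 ≤ i ∧ sp = cs.getD (i - 2) ' ' ∧ sp = cs.getD (i - 3) ' ' then d.getD 2 0 else 0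
  let v4 := if (sp = '7' ∨ sp = '9') ∧
               (4 ≤ i ∧ sp = cs.getD (i - 2) ' ' ∧ sp = cs.getD (i - 3) ' ' ∧ sp = cs.getD (i - 4) ' ')
            then d.getD 3 0 else 0
  PySem.Int.mod (d.getD 0 0 + v2 + v3 + v4) pmod :: d

def countTexts (S : String) : Int :=
  let cs := S.toList
  -- dp[0] = 1; for i in range(1, len(S)+1): …; return dp[-1] % mod
  PySem.Int.mod (((List.range' 1 cs.length).foldl (aStep cs) [1]).getD 0 0) pmod

-- ===== PORT B =====
-- _runFactor(c, L): partitions of a run of L equal digits into groups of ≤ cap presses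
def fval (cap : Nat) : Nat → Int
  | 0 => 1
  | n + 1 => PySem.Int.mod (((List.range (min cap (n + 1))).map (fun t => fval cap (n - t))).sum) pmod
termination_by n => n
decreasing_by omega

def runFactor (c : Char) (L : Nat) : Int :=
  fval (if c = '7' ∨ c = '9' then 4 else 3) L

-- the for-loop of B: state (ans, c, L), flushing a factor at each run boundary
def altLoop (rest : List Char) (ans : Int) (c : Char) (L : Nat) : Int :=
  match rest with
  | [] => PySem.Int.mod (ans * runFactor c L) pmod
  | x :: rest' =>
      if x = c then altLoop rest' ans c (L + 1)
      else altLoop rest' (PySem.Int.mod (ans * runFactor c L) pmod) x 1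

def countTexts_alt (S : String) : Int :=
  match S.toList with
  | [] => 1
  | c :: rest => altLoop rest 1 c 1

-- ===== PRECONDITION & SPEC =====
def Spec_countTexts (S : String) (out : Int) : Prop := out = countTexts_alt S
instance (S : String) (out : Int) : Decidable (Spec_countTexts S out) := by unfold Spec_countTexts; infer_instance

-- ===== CLAIM (what is proved, stated in full; the proofs are below) =====
def Claim_equal_countTexts : Prop := ∀ (S : String), Dom_countTexts S → Spec_countTexts S (countTexts S)

-- ===== LEMMAS AND PROOFS =====

def capOf (c : Char) : Nat := if c = '7' ∨ c = '9' then 4 else 3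

theorem runFactor_eq (c : Char) (L : Nat) : runFactor c L = fval (capOf c) L := rfl

theorem capOf_cases (c : Char) : capOf c = 3 ∨ capOf c = 4 := by
  unfold capOf; split <;> simp

theorem pymod_emod (a : Int) : PySem.Int.mod a pmod = a % pmod :=
  PySem.Int.mod_eq_emod_of_pos (by norm_num [pmod])

theorem mulmod (P a : Int) : P * (a % pmod) % pmod = P * a % pmod := by
  conv_lhs => rw [Int.mul_emod, Int.emod_emod_of_dvd _ dvd_rfl, ← Int.mul_emod]

theorem emod_idem (a : Int) : a % pmod % pmod = a % pmod :=
  Int.emod_emod_of_dvd _ dvd_rfl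

theorem fval_zero (cap : Nat) : fval cap 0 = 1 := by simp [fval]

theorem fval_succ (cap n : Nat) :
    fval cap (n + 1) = ((List.range (min cap (n + 1))).map (fun t => fval cap (n - t))).sum % pmod := by
  rw [fval, pymod_emod]

theorem fval_one (c : Char) : fval (capOf c) 1 = 1 := by
  have h : min (capOf c) 1 = 1 := by rcases capOf_cases c with h | h <;> simp [h]
  rw [fval_succ, h]
  norm_num [pmod, fval_zero]

theorem drop_head (cs : List Char) (i : Nat) (x : Char) (r : List Char)
    (h : cs.drop i = x :: r) : cs.getD i ' ' = x ∧ cs.drop (i + 1) = r := by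
  constructor
  · have h0 : cs[i]? = some x := by
      have := (List.getElem?_drop (xs := cs) (i := i) (j := 0)).symm
      simp [h] at this; simpa using this
    simp [List.getD, h0]
  · have := congrArg List.tail h
    simpa [List.tail_drop] using this

-- the value A pushes when the current run (cap, length j) is extended by one more equal digit
theorem headval (cap j : Nat) (P x2 x3 x4 : Int) (hcap : cap = 3 ∨ cap = 4) (hj : 1 ≤ j)
    (h2 : x2 = P * fval cap (j - 1) % pmod)
    (h3 : x3 = if 2 ≤ j then P * fval cap (j - 2) % pmod else 0)
    (h4 : x4 = if cap = 4 ∧ 3 ≤ j then P * fval cap (j - 3) % pmod else 0) :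
    (P * fval cap j % pmod + x2 + x3 + x4) % pmod = P * fval cap (j + 1) % pmod := by
  subst h2 h3 h4
  rw [fval_succ, mulmod]
  rcases hcap with hc | hc <;> subst hc
  · rcases Nat.lt_or_ge j 2 with hj2 | hj2
    · have hj1 : j = 1 := by omega
      subst hj1
      norm_num [List.range_succ, pmod]
      rw [mul_add]
    · have hmin : min 3 (j + 1) = 3 := by omega
      rw [hmin, if_pos hj2, if_neg (by simp)]
      simp only [List.range_succ, List.range_zero, List.map, List.sum_cons, List.sum_nil,
        List.nil_append, List.cons_append, Nat.sub_zero]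
      simp only [pmod]
      ring_nf
      omega
  · rcases Nat.lt_or_ge j 2 with hj2 | hj2
    · have hj1 : j = 1 := by omega
      subst hj1
      norm_num [List.range_succ, pmod]
      rw [mul_add]
    · rcases Nat.lt_or_ge j 3 with hj3 | hj3
      · have hj2' : j = 2 := by omega
        subst hj2'
        rw [show min 4 (2 + 1) = 3 by omega, if_pos hj2, if_neg (by omega)]
        simp only [List.range_succ, List.range_zero, List.map, List.sum_cons, List.sum_nil,
          List.nil_append, List.cons_append, Nat.sub_zero]
        simp only [pmod]
        ring_nf
        omega
      · have hmin : min 4 (j + 1) = 4 := by omega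
        rw [hmin, if_pos hj2, if_pos ⟨rfl, hj3⟩]
        simp only [List.range_succ, List.range_zero, List.map, List.sum_cons, List.sum_nil,
          List.nil_append, List.cons_append, Nat.sub_zero]
        simp only [pmod]
        ring_nf
        omega

-- main invariant: A's fold, resumed in the middle of a run (j chars of the current run with
-- character c consumed, P the running product of the completed runs' factors), computes altLoop
theorem A_loop (rest : List Char) : ∀ (cs : List Char) (i j : Nat) (c : Char) (P : Int)
    (d : List Int),
    cs.drop i = rest →
    i + rest.length = cs.length →
    1 ≤ j → j ≤ i →
    (∀ u, u < j → cs.getD (i - 1 - u) ' ' = c) →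
    (j < i → cs.getD (i - 1 - j) ' ' ≠ c) →
    (∀ t, t ≤ 4 → t ≤ j → d.getD t 0 = P * fval (capOf c) (j - t) % pmod) →
    ((List.range' (i + 1) rest.length).foldl (aStep cs) d).getD 0 0 = altLoop rest P c j := by
  induction rest with
  | nil =>
    intro cs i j c P d hdrop hlen hj1 hji hrun hbd hd
    have h0 := hd 0 (by omega) (by omega)
    simpa [altLoop, pymod_emod, runFactor_eq] using h0
  | cons x rest' ih =>
    intro cs i j c P d hdrop hlen hj1 hji hrun hbd hd
    obtain ⟨hx, hdrop'⟩ := drop_head cs i x rest' hdrop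
    have hi1 : 1 ≤ i := by omega
    have hchar0 : cs.getD (i - 1) ' ' = c := by simpa using hrun 0 (by omega)
    rw [List.length_cons, List.range'_succ, List.foldl_cons]
    have n1 : i + 1 - 1 = i := by omega
    have n2 : i + 1 - 2 = i - 1 := by omega
    have n3 : i + 1 - 3 = i - 1 - 1 := by omega
    have n4 : i + 1 - 4 = i - 1 - 2 := by omega
    by_cases hxc : x = c
    · -- run continues: look-back conditions hold exactly up to the current run length
      subst hxc
      have hcond3 : (3 ≤ i + 1 ∧ True ∧ x = cs.getD (i - 1 - 1) ' ') ↔ 2 ≤ j := by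
        constructor
        · rintro ⟨hg, -, hb⟩
          by_contra hlt
          have hj : j = 1 := by omega
          exact hbd (by omega) (by rw [hj]; exact hb.symm)
        · intro h2j
          exact ⟨by omega, trivial, (hrun 1 (by omega)).symm⟩
      have hcond4 : ((x = '7' ∨ x = '9') ∧
          (4 ≤ i + 1 ∧ True ∧ x = cs.getD (i - 1 - 1) ' ' ∧ x = cs.getD (i - 1 - 2) ' '))
          ↔ (capOf x = 4 ∧ 3 ≤ j) := by
        constructor
        · rintro ⟨h79, hg, -, hb, he⟩
          refine ⟨by unfold capOf; rw [if_pos h79], ?_⟩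
          by_contra hlt
          have hj2 : 2 ≤ j := by
            by_contra hj1'
            have hj : j = 1 := by omega
            exact hbd (by omega) (by rw [hj]; exact hb.symm)
          have hj : j = 2 := by omega
          exact hbd (by omega) (by rw [hj]; exact he.symm)
        · rintro ⟨hc4, h3j⟩
          have h79 : x = '7' ∨ x = '9' := by
            by_contra h
            rw [capOf, if_neg h] at hc4
            omega
          exact ⟨h79, by omega, trivial, (hrun 1 (by omega)).symm, (hrun 2 (by omega)).symm⟩
      have hstep : aStep cs d (i + 1) = (P * fval (capOf x) (j + 1) % pmod) :: d := by
        simp only [aStep, n1, n2, n3, n4, hx, hchar0]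
        congr 1
        rw [if_pos (⟨by omega, trivial⟩ : 2 ≤ i + 1 ∧ True),
            if_congr hcond3 rfl rfl, if_congr hcond4 rfl rfl, pymod_emod]
        have h0 := hd 0 (by omega) (by omega)
        simp only [Nat.sub_zero] at h0
        rw [h0]
        refine headval (capOf x) j P _ _ _ (capOf_cases x) hj1 (hd 1 (by omega) (by omega)) ?_ ?_
        · split_ifs with h
          · exact hd 2 (by omega) h
          · rfl
        · split_ifs with h
          · exact hd 3 (by omega) h.2
          · rfl
      rw [hstep]
      have hRHS : altLoop (x :: rest') P x j = altLoop rest' P x (j + 1) := by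
        simp [altLoop]
      rw [hRHS]
      refine ih cs (i + 1) (j + 1) x P _ hdrop'
        (by simp only [List.length_cons] at hlen; omega) (by omega) (by omega) ?_ ?_ ?_
      · intro u hu
        match u with
        | 0 => simpa using hx
        | v + 1 =>
          have e : i + 1 - 1 - (v + 1) = i - 1 - v := by omega
          rw [e]
          exact hrun v (by omega)
      · intro hlt
        have e : i + 1 - 1 - (j + 1) = i - 1 - j := by omega
        rw [e]
        exact hbd (by omega)
      · intro t ht htj
        match t with
        | 0 => simp
        | v + 1 =>
          have e : j + 1 - (v + 1) = j - v := by omega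
          rw [List.getD_cons_succ, e]
          exact hd v (by omega) (by omega)
    · -- run boundary: every look-back condition fails, A flushes to P * runFactor c j % mod
      have hstep : aStep cs d (i + 1) = (P * fval (capOf c) j % pmod) :: d := by
        simp only [aStep, n1, n2, n3, n4, hx, hchar0]
        rw [if_neg (by rintro ⟨-, h⟩; exact hxc h),
            if_neg (by rintro ⟨-, h, -⟩; exact hxc h),
            if_neg (by rintro ⟨-, -, h, -⟩; exact hxc h)]
        have h0 := hd 0 (by omega) (by omega)
        simp only [Nat.sub_zero] at h0
        rw [pymod_emod, add_zero, add_zero, add_zero, h0, emod_idem]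
      rw [hstep]
      have hRHS : altLoop (x :: rest') P c j
          = altLoop rest' (P * fval (capOf c) j % pmod) x 1 := by
        simp only [altLoop, if_neg hxc, pymod_emod, runFactor_eq]
      rw [hRHS]
      refine ih cs (i + 1) 1 x (P * fval (capOf c) j % pmod) _ hdrop'
        (by simp only [List.length_cons] at hlen; omega) (by omega) (by omega) ?_ ?_ ?_
      · intro u hu
        have hu0 : u = 0 := by omega
        subst hu0
        simpa using hx
      · intro hlt
        have e : i + 1 - 1 - 1 = i - 1 := by omega
        rw [e, hchar0]
        exact fun h => hxc h.symm
      · intro t ht htj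
        match t with
        | 0 =>
          simp only [List.getD_cons_zero, Nat.sub_zero]
          rw [fval_one, mul_one, emod_idem]
        | 1 =>
          have h0 := hd 0 (by omega) (by omega)
          simp only [Nat.sub_zero] at h0
          simp only [List.getD_cons_succ, Nat.sub_self, fval_zero, mul_one, emod_idem]
          exact h0

theorem altLoop_mod_self (rest : List Char) : ∀ (P : Int) (c : Char) (j : Nat),
    PySem.Int.mod (altLoop rest P c j) pmod = altLoop rest P c j := by
  induction rest with
  | nil => intro P c j; simp [altLoop, pymod_emod]
  | cons x rest' ih =>
    intro P c j
    simp only [altLoop]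
    split <;> apply ih

-- ===== VERDICT (by name: the statement is the Claim_ definition above) =====
theorem countTexts_spec : Claim_equal_countTexts := by
  unfold Claim_equal_countTexts
  intro S _
  unfold Spec_countTexts
  simp only [countTexts, countTexts_alt]
  cases hS : S.toList with
  | nil =>
    norm_num [List.range', pymod_emod, pmod]
  | cons c rest =>
    rw [List.length_cons, List.range'_succ, List.foldl_cons]
    have hfirst : aStep (c :: rest) [1] 1 = [1, 1] := by
      simp only [aStep]
      rw [if_neg (by rintro ⟨h, -⟩; omega), if_neg (by rintro ⟨h, -⟩; omega),
          if_neg (by rintro ⟨-, h, -⟩; omega)]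
      norm_num [pymod_emod, pmod]
    rw [hfirst]
    have hinv := A_loop rest (c :: rest) 1 1 c 1 [1, 1] (by simp) (by simp [Nat.add_comm])
      (by omega) (by omega)
      (by intro u hu; interval_cases u; simp)
      (by omega)
      (by
        intro t ht htj
        match t with
        | 0 => simp [fval_one, pmod]
        | 1 => simp [fval_zero, pmod])
    rw [hinv]
    exact altLoop_mod_self rest 1 c 1
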